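-- pv_equiv track=rewrite | github.com/alfphaderp/advent-of-code-2020 | day21/solution.py | part2
-- ===== SOURCE A (Python) =====
-- def part2(allergen_dict, ingredient_counts):
--     final_allergen_dict = {}
--     while len(final_allergen_dict) < len(allergen_dict):
--         for allergen, ingredients in allergen_dict.items():
--             if len(ingredients) == 1:
--                 found_ingredient = ingredients.pop()
--                 final_allergen_dict[allergen] = found_ingredient
--                 for ingredients in allergen_dict.values():
--                     ingredients.discard(found_ingredient)
--
--     return ','.join([j for i, j in list(sorted(final_allergen_dict.items()))])
-- ===== SOURCE B (Python) =====
-- # Different decomposition: recursive elimination over a shrinking 'pending' list with a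
-- # growing 'used' set (remaining candidates computed by set-difference), instead of A's
-- # repeated full passes over the whole dict with in-place pop/discard of the sets.
-- # Return-value equivalence only: A empties the sets inside allergen_dict in place,
-- # B leaves its arguments untouched.
-- def part2(allergen_dict, ingredient_counts):
--     def solve(pending, used):
--         for idx, (allergen, ingredients) in enumerate(pending):
--             remaining = ingredients - used
--             if len(remaining) == 1:
--                 (ingredient,) = remaining
--                 return [(allergen, ingredient)] + solve(
--                     pending[:idx] + pending[idx + 1:], used | {ingredient})
--         return []
--
--     pairs = solve(list(allergen_dict.items()), set())
--     return ','.join(ingredient for _, ingredient in sorted(pairs))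
-- ===== Notes on version B (the rewrite author's own statement) =====
-- stated objective: alternative
-- what changed: Replaces A's repeated full passes over the dict with in-place pop/discard mutation of the candidate sets by a pure recursion on a shrinking pending list: each step finds the first allergen whose candidates minus the already-used ingredients form a singleton, records it, and recurses without that allergen; only the return value is matched (A additionally empties the sets in allergen_dict in place, B does not mutate its arguments).
import Mathlib
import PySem

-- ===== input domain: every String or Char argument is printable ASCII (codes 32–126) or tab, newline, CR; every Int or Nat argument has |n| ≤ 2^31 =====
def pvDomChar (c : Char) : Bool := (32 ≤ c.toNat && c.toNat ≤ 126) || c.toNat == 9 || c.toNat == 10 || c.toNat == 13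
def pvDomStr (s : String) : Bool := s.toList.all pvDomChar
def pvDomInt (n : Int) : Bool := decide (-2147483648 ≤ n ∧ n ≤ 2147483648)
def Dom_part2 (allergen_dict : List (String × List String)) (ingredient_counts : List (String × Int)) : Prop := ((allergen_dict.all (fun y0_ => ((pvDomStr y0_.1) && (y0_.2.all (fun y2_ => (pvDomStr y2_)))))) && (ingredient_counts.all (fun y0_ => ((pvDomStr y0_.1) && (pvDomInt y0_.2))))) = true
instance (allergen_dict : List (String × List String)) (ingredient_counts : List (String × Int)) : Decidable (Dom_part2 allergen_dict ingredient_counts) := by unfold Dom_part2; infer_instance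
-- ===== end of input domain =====

-- B replaces A's repeated in-place-mutating passes by a pure recursion on a shrinking
-- pending list (alternative decomposition, no speed claim). Return value only: the Python A
-- empties the sets inside allergen_dict in place, the Python B does not mutate its arguments.

-- ===== PORT A =====
-- the inner 'for ingredients in allergen_dict.values(): ingredients.discard(found)' loop
def part2Discard (found : String) (d : List (String × List String)) : List (String × List String) :=
  d.map (fun kv => (kv.1, PySem.Set.discard kv.2 found))

-- one execution of 'for allergen, ingredients in allergen_dict.items(): …', position i;
-- the values view sees the in-place discards, so the current list d is threaded through
def part2Pass (d : List (String × List String)) (fin : PySem.Dict String String) (i : Nat) :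
    List (String × List String) × PySem.Dict String String :=
  if h : i < d.length then
    if d[i].2.length == 1 then
      -- set.pop() on a one-element set returns its unique element and removes it; the
      -- subsequent discard loop removes it from every set (incl. the now-empty one)
      let found := d[i].2.headD ""
      part2Pass (part2Discard found d) (fin.insert d[i].1 found) (i+1)
    else part2Pass d fin (i+1)
  else (d, fin)
termination_by d.length - i
decreasing_by
  · simp only [part2Discard, List.length_map]; omega
  · omega

-- 'while len(final_allergen_dict) < len(allergen_dict)': fuel only makes the loop total;
-- under Pre_ every pass resolves at least one allergen, so length-many passes suffice
def part2While : Nat → List (String × List String) → PySem.Dict String String →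
    List (String × List String) × PySem.Dict String String
  | 0, d, fin => (d, fin)
  | fuel+1, d, fin =>
    if fin.size < d.length then
      let r := part2Pass d fin 0
      part2While fuel r.1 r.2
    else (d, fin)

def part2 (allergen_dict : List (String × List String)) (ingredient_counts : List (String × Int)) : String :=
  let r := part2While allergen_dict.length allergen_dict (PySem.Dict.mk [])
  PySem.Str.join "," ((PySem.List.sorted2 r.2.items Prod.fst Prod.snd).map Prod.snd)

-- ===== PORT B =====
-- the 'for idx, (allergen, ingredients) in enumerate(pending)' scan of Source B's solve:
-- first pending allergen whose candidates minus 'used' form a singleton, plus the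
-- pending list without it (pending[:idx] + pending[idx+1:])
def part2Pick (used : List String) : List (String × List String) →
    Option (String × String × List (String × List String))
  | [] => none
  | (a, s) :: rest =>
    let remaining := PySem.Set.diff s used
    if remaining.length == 1 then some (a, remaining.headD "", rest)
    else match part2Pick used rest with
      | none => none
      | some (b, x, rest') => some (b, x, (a, s) :: rest')

theorem part2Pick_length {used : List String} :
    ∀ {pending : List (String × List String)} {r},
      part2Pick used pending = some r → r.2.2.length + 1 = pending.length := by
  intro pending
  induction pending with
  | nil => intro r h; simp [part2Pick] at h
  | cons e rest ih =>
    intro r h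
    obtain ⟨a, s⟩ := e
    simp only [part2Pick] at h
    split at h
    · cases h; simp
    · revert h; split
      · intro h; cases h
      · rename_i b x rest' hr
        intro h; cases h
        have := ih hr
        simp at this ⊢
        omega

def part2Solve (pending : List (String × List String)) (used : List String) : List (String × String) :=
  match h : part2Pick used pending with
  | none => []
  | some r => (r.1, r.2.1) :: part2Solve r.2.2 (PySem.Set.add used r.2.1)
termination_by pending.length
decreasing_by have := part2Pick_length h; omega

def part2_alt (allergen_dict : List (String × List String)) (ingredient_counts : List (String × Int)) : String :=
  let pairs := part2Solve allergen_dict []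
  PySem.Str.join "," ((PySem.List.sorted2 pairs Prod.fst Prod.snd).map Prod.snd)

-- ===== PRECONDITION & SPEC =====
-- 'part2Forced l used': along the entry order l, each allergen's candidates minus the
-- previously forced ingredients form a singleton (which is then forced in turn)
def part2Forced : List (String × List String) → List String → Bool
  | [], _ => true
  | (_, s) :: rest, used =>
    let r := s.filter (fun v => !(used.contains v))
    r.length == 1 && part2Forced rest (used ++ r)

-- Pre_ excludes exactly (a) inputs on which A's while-loop never terminates (no elimination
-- order forces every allergen — A returns nothing there), and (b) association lists with
-- duplicate allergen keys, which do not represent a Python dict at all.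
def Pre_part2 (allergen_dict : List (String × List String)) (ingredient_counts : List (String × Int)) : Prop :=
  (allergen_dict.map Prod.fst).Nodup ∧
    ∃ l ∈ allergen_dict.permutations, part2Forced l [] = true
instance (allergen_dict : List (String × List String)) (ingredient_counts : List (String × Int)) : Decidable (Pre_part2 allergen_dict ingredient_counts) := by unfold Pre_part2; infer_instance

def pvWitness_part2 : (List (String × List String)) × (List (String × Int)) :=
  ([("dairy", ["mxmxvkd"]), ("fish", ["mxmxvkd", "sqjhc"])], [("mxmxvkd", 3)])

def Spec_part2 (allergen_dict : List (String × List String)) (ingredient_counts : List (String × Int)) (out : String) : Prop := out = part2_alt allergen_dict ingredient_counts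
instance (allergen_dict : List (String × List String)) (ingredient_counts : List (String × Int)) (out : String) : Decidable (Spec_part2 allergen_dict ingredient_counts out) := by unfold Spec_part2; infer_instance

-- ===== CLAIM (what is proved, stated in full; the proofs are below) =====
def Claim_equal_part2 : Prop := ∀ (allergen_dict : List (String × List String)) (ingredient_counts : List (String × Int)), Dom_part2 allergen_dict ingredient_counts → Pre_part2 allergen_dict ingredient_counts → Spec_part2 allergen_dict ingredient_counts (part2 allergen_dict ingredient_counts)

-- ===== LEMMAS AND PROOFS =====

-- A forced run over the original dict d0: pairs (allergen, ingredient) such that, with u the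
-- ingredients forced before, each allergen's candidate set minus u is exactly [ingredient].
def RunAux (d0 : List (String × List String)) : List String → List (String × String) → Prop
  | _, [] => True
  | u, (a, x) :: rest =>
    (∃ s, (a, s) ∈ d0 ∧ s.filter (fun v => !(u.contains v)) = [x]) ∧ RunAux d0 (u ++ [x]) rest


-- ---- generic helpers ----
theorem entryUniq {d0 : List (String × List String)} (hnd : (d0.map Prod.fst).Nodup)
    {a : String} {s t : List String} (hs : (a, s) ∈ d0) (ht : (a, t) ∈ d0) : s = t := by
  induction d0 with
  | nil => cases hs
  | cons e rest ih =>
    simp only [List.map_cons, List.nodup_cons] at hnd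
    rcases List.mem_cons.1 hs with h1 | h1 <;> rcases List.mem_cons.1 ht with h2 | h2
    · rw [← h2] at h1; exact (Prod.ext_iff.1 h1).2
    · exfalso; apply hnd.1; rw [← h1]; exact List.mem_map.2 ⟨(a, t), h2, rfl⟩
    · exfalso; apply hnd.1; rw [← h2]; exact List.mem_map.2 ⟨(a, s), h1, rfl⟩
    · exact ih hnd.2 h1 h2

theorem len1_eq_headD {l : List String} (h : l.length = 1) : l = [l.headD ""] := by
  cases l with
  | nil => simp at h
  | cons x t => cases t with
    | nil => rfl
    | cons y u => simp at h

-- ---- RunAux basic facts ----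
theorem chainMem {d0 : List (String × List String)} :
    ∀ {u ps} {a x : String}, RunAux d0 u ps → (a, x) ∈ ps →
      ∃ s, (a, s) ∈ d0 ∧ x ∈ s ∧ x ∉ u := by
  intro u ps
  induction ps generalizing u with
  | nil => intro a x _ h; cases h
  | cons p rest ih =>
    intro a x hr hm
    obtain ⟨b, y⟩ := p
    obtain ⟨⟨s, hsd, hf⟩, hrest⟩ := hr
    rcases List.mem_cons.1 hm with h | h
    · cases h
      refine ⟨s, hsd, ?_, ?_⟩
      · have : x ∈ s.filter (fun v => !(u.contains v)) := by rw [hf]; simp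
        exact (List.mem_filter.1 this).1
      · have : x ∈ s.filter (fun v => !(u.contains v)) := by rw [hf]; simp
        have := (List.mem_filter.1 this).2
        simp at this; exact this
    · obtain ⟨s', h1, h2, h3⟩ := ih hrest h
      exact ⟨s', h1, h2, fun hx => h3 (by simp [hx])⟩

theorem valsNodup {d0 : List (String × List String)} :
    ∀ {u ps}, RunAux d0 u ps →
      (ps.map Prod.snd).Nodup ∧ ∀ v ∈ ps.map Prod.snd, v ∉ u := by
  intro u ps
  induction ps generalizing u with
  | nil => intro _; simp
  | cons p rest ih =>
    intro hr
    obtain ⟨a, x⟩ := p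
    obtain ⟨⟨s, hsd, hf⟩, hrest⟩ := hr
    obtain ⟨hnd, hni⟩ := ih hrest
    have hxu : x ∉ u := by
      have : x ∈ s.filter (fun v => !(u.contains v)) := by rw [hf]; simp
      have := (List.mem_filter.1 this).2; simp at this; exact this
    constructor
    · simp only [List.map_cons, List.nodup_cons]
      refine ⟨fun hx => ?_, hnd⟩
      have := hni x hx; simp at this
    · intro v hv
      rcases List.mem_cons.1 hv with h | h
      · subst h; exact hxu
      · intro hvu; exact hni v h (by simp [hvu])

theorem keysSub {d0 : List (String × List String)} {u ps} (hr : RunAux d0 u ps) :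
    ∀ c ∈ ps.map Prod.fst, c ∈ d0.map Prod.fst := by
  intro c hc
  obtain ⟨⟨a, x⟩, hm, rfl⟩ := List.mem_map.1 hc
  obtain ⟨s, hsd, _, _⟩ := chainMem hr hm
  exact List.mem_map_of_mem hsd

theorem keysNodup {d0 : List (String × List String)} (hnd : (d0.map Prod.fst).Nodup) :
    ∀ {u ps}, RunAux d0 u ps → (ps.map Prod.fst).Nodup := by
  intro u ps
  induction ps generalizing u with
  | nil => intro _; simp
  | cons p rest ih =>
    intro hr
    obtain ⟨a, x⟩ := p
    obtain ⟨⟨s, hsd, hf⟩, hrest⟩ := hr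
    simp only [List.map_cons, List.nodup_cons]
    refine ⟨fun ha => ?_, ih hrest⟩
    obtain ⟨⟨b, z⟩, hm, hb⟩ := List.mem_map.1 ha
    cases hb
    obtain ⟨s', hs'd, hz, hzu⟩ := chainMem hrest hm
    have hss : s' = s := entryUniq hnd hs'd hsd
    rw [hss] at hz
    have hzIn : z ∈ s.filter (fun v => !(u.contains v)) := by
      refine List.mem_filter.2 ⟨hz, ?_⟩
      simp only [Bool.not_eq_eq_eq_not, Bool.not_true, List.contains_eq_mem, decide_eq_false_iff_not]
      intro hzu'; exact hzu (by simp [hzu'])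
    rw [hf] at hzIn
    simp at hzIn
    exact hzu (by simp [hzIn])

theorem candSubset {d0 : List (String × List String)} (hnd : (d0.map Prod.fst).Nodup) :
    ∀ {u ps} {a x : String} {s}, RunAux d0 u ps → (a, x) ∈ ps → (a, s) ∈ d0 →
      ∀ v ∈ s, v ∈ u ∨ v ∈ ps.map Prod.snd := by
  intro u ps
  induction ps generalizing u with
  | nil => intro a x s _ h; cases h
  | cons p rest ih =>
    intro a x s hr hm hsd v hv
    obtain ⟨b, y⟩ := p
    obtain ⟨⟨t, htd, hf⟩, hrest⟩ := hr
    rcases List.mem_cons.1 hm with h | h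
    · cases h
      rw [entryUniq hnd hsd htd] at hv
      by_cases hvu : v ∈ u
      · exact Or.inl hvu
      · have hvf : v ∈ t.filter (fun w => !(u.contains w)) :=
          List.mem_filter.2 ⟨hv, by simp [hvu]⟩
        rw [hf] at hvf
        simp at hvf
        right; simp [hvf]
    · rcases ih hrest h hsd v hv with h1 | h1
      · rcases List.mem_append.1 h1 with h2 | h2
        · exact Or.inl h2
        · right; simp at h2; simp [h2]
      · right; simp [h1]

theorem runSnoc {d0 : List (String × List String)} :
    ∀ {u ps} {a x : String}, RunAux d0 u ps →
      (∃ s, (a, s) ∈ d0 ∧ s.filter (fun v => !((u ++ ps.map Prod.snd).contains v)) = [x]) →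
      RunAux d0 u (ps ++ [(a, x)]) := by
  intro u ps
  induction ps generalizing u with
  | nil =>
    intro a x _ h
    refine ⟨?_, trivial⟩
    simpa using h
  | cons p rest ih =>
    intro a x hr hex
    obtain ⟨b, y⟩ := p
    obtain ⟨hc, hrest⟩ := hr
    refine ⟨hc, ih hrest ?_⟩
    obtain ⟨s, hsd, hf⟩ := hex
    refine ⟨s, hsd, ?_⟩
    rw [← hf]
    apply List.filter_congr
    intro v _
    have : ((u ++ [y]) ++ rest.map Prod.snd).contains v
        = (u ++ ((b, y) :: rest).map Prod.snd).contains v := by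
      simp [List.append_assoc]
    rw [this]


theorem valsInj {L : List (String × String)} (hnd : (L.map Prod.snd).Nodup) :
    ∀ {a b v : String}, (b, v) ∈ L → (a, v) ∈ L → b = a := by
  induction L with
  | nil => intro a b v h; cases h
  | cons p rest ih =>
    intro a b v hb ha
    obtain ⟨c, w⟩ := p
    simp only [List.map_cons, List.nodup_cons] at hnd
    rcases List.mem_cons.1 hb with h1 | h1 <;> rcases List.mem_cons.1 ha with h2 | h2
    · rw [← h2] at h1; exact (Prod.ext_iff.1 h1).1
    · exfalso; apply hnd.1
      have hvw : v = w := (Prod.ext_iff.1 h1).2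
      exact List.mem_map.2 ⟨(a, v), h2, hvw ▸ rfl⟩
    · exfalso; apply hnd.1
      have hvw : v = w := (Prod.ext_iff.1 h2).2
      exact List.mem_map.2 ⟨(b, v), h1, hvw ▸ rfl⟩
    · exact ih hnd.2 h1 h2

theorem keysInj {L : List (String × String)} (hnd : (L.map Prod.fst).Nodup) :
    ∀ {a x y : String}, (a, y) ∈ L → (a, x) ∈ L → y = x := by
  induction L with
  | nil => intro a x y h; cases h
  | cons p rest ih =>
    intro a x y hy hx
    obtain ⟨c, w⟩ := p
    simp only [List.map_cons, List.nodup_cons] at hnd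
    rcases List.mem_cons.1 hy with h1 | h1 <;> rcases List.mem_cons.1 hx with h2 | h2
    · rw [← h2] at h1; exact (Prod.ext_iff.1 h1).2
    · exfalso; apply hnd.1
      have : a = c := (Prod.ext_iff.1 h1).1
      exact List.mem_map.2 ⟨(a, x), h2, this ▸ rfl⟩
    · exfalso; apply hnd.1
      have : a = c := (Prod.ext_iff.1 h2).1
      exact List.mem_map.2 ⟨(a, y), h1, this ▸ rfl⟩
    · exact ih hnd.2 h1 h2

theorem filterStrengthen {s : List String} {p q : String → Bool} {x : String}
    (hpf : s.filter p = [x]) (himp : ∀ v, q v = true → p v = true) (hqx : q x = true) :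
    s.filter q = [x] := by
  have h1 : s.filter q = (s.filter p).filter q := by
    rw [List.filter_filter]
    apply List.filter_congr
    intro v _
    cases hq : q v
    · simp
    · simp [himp v hq]
  rw [h1, hpf]
  simp [hqx]

theorem agree {d0 : List (String × List String)} (hnd : (d0.map Prod.fst).Nodup)
    {L : List (String × String)} (hL : RunAux d0 [] L) :
    ∀ {ps : List (String × String)} {u : List String}, RunAux d0 u ps →
      (ps.map Prod.fst).Nodup →
      (∀ c ∈ ps.map Prod.fst, c ∈ L.map Prod.fst) →
      (∀ v ∈ u, ∃ b, (b, v) ∈ L ∧ b ∉ ps.map Prod.fst) →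
      ∀ pr ∈ ps, pr ∈ L := by
  intro ps
  induction ps with
  | nil => intro u _ _ _ _ pr h; cases h
  | cons p rest ih =>
    intro u hr hknd hcov hu pr hpr
    obtain ⟨a, x⟩ := p
    obtain ⟨⟨s, hsd, hf⟩, hrest⟩ := hr
    simp only [List.map_cons, List.nodup_cons] at hknd
    have haL : a ∈ L.map Prod.fst := hcov a (by simp)
    obtain ⟨⟨a'', y⟩, hmL0, hfst⟩ := List.mem_map.1 haL
    simp only at hfst
    have hmL : (a, y) ∈ L := by rwa [hfst] at hmL0
    have hyx : y = x := by
      by_contra hne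
      obtain ⟨s', hs'd, hy, _⟩ := chainMem hL hmL
      rw [entryUniq hnd hs'd hsd] at hy
      have hyu : y ∈ u := by
        by_contra hyu
        have : y ∈ s.filter (fun v => !(u.contains v)) :=
          List.mem_filter.2 ⟨hy, by simp [hyu]⟩
        rw [hf] at this; simp at this; exact hne this
      obtain ⟨b, hbL, hbk⟩ := hu y hyu
      have hba : b ≠ a := fun h => hbk (by simp [h])
      exact hba (valsInj (valsNodup hL).1 hbL hmL)
    subst hyx
    have hxL : (a, y) ∈ L := hmL
    have hrec : ∀ pr ∈ rest, pr ∈ L := by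
      apply ih hrest hknd.2
      · intro c hc; exact hcov c (by simp [hc])
      · intro v hv
        rcases List.mem_append.1 hv with h1 | h1
        · obtain ⟨b, hbL, hbk⟩ := hu v h1
          exact ⟨b, hbL, fun h => hbk (by simp [h])⟩
        · simp at h1
          subst h1
          exact ⟨a, hxL, hknd.1⟩
    rcases List.mem_cons.1 hpr with h | h
    · rw [h]; exact hxL
    · exact hrec pr h

theorem progressAux {d0 : List (String × List String)} (hnd : (d0.map Prod.fst).Nodup)
    {L : List (String × String)} (hL : RunAux d0 [] L)
    {ps : List (String × String)} (hps : RunAux d0 [] ps)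
    (hcovps : ∀ c ∈ ps.map Prod.fst, c ∈ L.map Prod.fst) :
    ∀ {L2 : List (String × String)} {u2 : List String}, RunAux d0 u2 L2 →
      (∀ e ∈ L2, e ∈ L) → (∀ v ∈ u2, v ∈ ps.map Prod.snd) →
      (∃ a ∈ L2.map Prod.fst, a ∉ ps.map Prod.fst) →
      ∃ a s x, (a, s) ∈ d0 ∧ a ∉ ps.map Prod.fst ∧
        s.filter (fun v => !((ps.map Prod.snd).contains v)) = [x] := by
  have hpsnd : (ps.map Prod.fst).Nodup := keysNodup hnd hps
  have hagree : ∀ pr ∈ ps, pr ∈ L :=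
    agree hnd hL hps hpsnd hcovps (fun v hv => absurd hv (by simp))
  intro L2
  induction L2 with
  | nil => intro u2 _ _ _ hex; simp at hex
  | cons p rest ih =>
    intro u2 hr hsub hu2 hex
    obtain ⟨a, x⟩ := p
    obtain ⟨⟨s, hsd, hf⟩, hrest⟩ := hr
    by_cases hak : a ∈ ps.map Prod.fst
    · obtain ⟨⟨a'', y⟩, hmy0, h⟩ := List.mem_map.1 hak
      simp only at h
      have hmy : (a, y) ∈ ps := by rwa [h] at hmy0
      have hyL : (a, y) ∈ L := hagree _ hmy
      have hxL : (a, x) ∈ L := hsub _ (by simp)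
      have hyx : y = x := keysInj (keysNodup hnd hL) hyL hxL
      subst hyx
      apply ih hrest (fun e he => hsub e (by simp [he]))
      · intro v hv
        rcases List.mem_append.1 hv with h1 | h1
        · exact hu2 v h1
        · simp at h1
          subst h1
          exact List.mem_map.2 ⟨(a, v), hmy, rfl⟩
      · obtain ⟨a0, ha0, ha0n⟩ := hex
        refine ⟨a0, ?_, ha0n⟩
        simp only [List.map_cons, List.mem_cons] at ha0
        rcases ha0 with h1 | h1
        · exfalso; rw [h1] at ha0n; exact ha0n hak
        · exact h1
    · refine ⟨a, s, x, hsd, hak, ?_⟩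
      have hxnv : x ∉ ps.map Prod.snd := by
        intro hx
        obtain ⟨⟨b, x'⟩, hmb0, h⟩ := List.mem_map.1 hx
        simp only at h
        have hmb : (b, x) ∈ ps := by rwa [h] at hmb0
        have hbL : (b, x) ∈ L := hagree _ hmb
        have hxL : (a, x) ∈ L := hsub _ (by simp)
        have hba : b = a := valsInj (valsNodup hL).1 hbL hxL
        exact hak (hba ▸ List.mem_map.2 ⟨(b, x), hmb, rfl⟩)
      apply filterStrengthen hf
      · intro v hv
        simp only [Bool.not_eq_eq_eq_not, Bool.not_true, List.contains_eq_mem,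
          decide_eq_false_iff_not] at hv ⊢
        intro hvu; exact hv (hu2 v hvu)
      · simp [hxnv]


theorem progress {d0 : List (String × List String)} (hnd : (d0.map Prod.fst).Nodup)
    {L : List (String × String)} (hL : RunAux d0 [] L)
    (hLcov : ∀ a ∈ d0.map Prod.fst, a ∈ L.map Prod.fst)
    {ps : List (String × String)} (hps : RunAux d0 [] ps)
    (hex : ∃ a ∈ d0.map Prod.fst, a ∉ ps.map Prod.fst) :
    ∃ a s x, (a, s) ∈ d0 ∧ a ∉ ps.map Prod.fst ∧
      s.filter (fun v => !((ps.map Prod.snd).contains v)) = [x] := by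
  refine progressAux hnd hL hps (fun c hc => hLcov c (keysSub hps c hc)) hL
    (fun e he => he) (fun v hv => absurd hv (by simp)) ?_
  obtain ⟨a, ha, han⟩ := hex
  exact ⟨a, hLcov a ha, han⟩

-- ---- port A: state characterisation ----
def maskD (vs : List String) (d : List (String × List String)) : List (String × List String) :=
  d.map (fun kv => (kv.1, kv.2.filter (fun v => !(vs.contains v))))

theorem maskD_length (vs : List String) (d : List (String × List String)) :
    (maskD vs d).length = d.length := by simp [maskD]

theorem maskD_nil (d : List (String × List String)) : maskD [] d = d := by
  simp [maskD]

theorem maskD_getElem (vs : List String) (d : List (String × List String)) (i : Nat)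
    (h : i < d.length) :
    (maskD vs d)[i]'(by simpa [maskD_length] using h)
      = (d[i].1, d[i].2.filter (fun v => !(vs.contains v))) := by
  simp [maskD]

theorem discard_maskD (x : String) (vs : List String) (d : List (String × List String)) :
    part2Discard x (maskD vs d) = maskD (vs ++ [x]) d := by
  simp only [part2Discard, maskD, List.map_map]
  apply List.map_congr_left
  intro kv _
  simp only [Function.comp_apply, PySem.Set.discard, List.filter_filter]
  congr 1
  apply List.filter_congr
  intro v _
  by_cases h1 : v ∈ vs <;> by_cases h2 : v = x <;>
    simp [h1, h2, List.contains_eq_mem]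

theorem dictInsertFresh (fin : PySem.Dict String String) (a x : String)
    (h : a ∉ fin.items.map Prod.fst) :
    (fin.insert a x).items = fin.items ++ [(a, x)] := by
  have hc : fin.contains a = false := by
    simp only [PySem.Dict.contains, List.any_eq_false]
    intro p hp
    have hne : p.1 ≠ a := fun he => h (List.mem_map.2 ⟨p, hp, he⟩)
    simp [hne]
  simp [PySem.Dict.insert, hc]

theorem passA_spec {d0 : List (String × List String)} (hnd : (d0.map Prod.fst).Nodup) :
    ∀ n i (fin : PySem.Dict String String), d0.length - i ≤ n → RunAux d0 [] fin.items →
      ∃ tail,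
        part2Pass (maskD (fin.items.map Prod.snd) d0) fin i
          = (maskD ((fin.items ++ tail).map Prod.snd) d0, PySem.Dict.mk (fin.items ++ tail)) ∧
        RunAux d0 [] (fin.items ++ tail) ∧
        ((∃ j, i ≤ j ∧ ∃ (hj : j < d0.length), d0[j].1 ∉ fin.items.map Prod.fst ∧
            (d0[j].2.filter (fun v => !((fin.items.map Prod.snd).contains v))).length = 1)
          → tail ≠ []) := by
  intro n
  induction n with
  | zero =>
    intro i fin hle hrun
    have hni : ¬ i < (maskD (fin.items.map Prod.snd) d0).length := by
      rw [maskD_length]; omega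
    refine ⟨[], ?_, by simpa using hrun, ?_⟩
    · rw [part2Pass, dif_neg hni]
      simp
    · rintro ⟨j, hij, hj, -⟩ -
      omega
  | succ n ih =>
    intro i fin hle hrun
    by_cases h : i < (maskD (fin.items.map Prod.snd) d0).length
    · have hid : i < d0.length := by rwa [maskD_length] at h
      have hget := maskD_getElem (fin.items.map Prod.snd) d0 i hid
      by_cases hlen :
          (d0[i].2.filter (fun v => !((fin.items.map Prod.snd).contains v))).length = 1
      · -- assignment branch
        set a := d0[i].1 with ha
        set x := (d0[i].2.filter (fun v => !((fin.items.map Prod.snd).contains v))).headD "" with hx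
        have hmem : (a, d0[i].2) ∈ d0 := by
          have : d0[i] ∈ d0 := List.getElem_mem hid
          simpa [ha] using this
        have hfilter : d0[i].2.filter (fun v => !((fin.items.map Prod.snd).contains v)) = [x] :=
          len1_eq_headD hlen
        have hgd : (maskD (fin.items.map Prod.snd) d0)[i]'(by rw [maskD_length]; exact hid)
            = (a, [x]) := by rw [hget, hfilter]
        have hfresh : a ∉ fin.items.map Prod.fst := by
          intro hak
          obtain ⟨⟨a', y⟩, hmy, hfst⟩ := List.mem_map.1 hak
          simp only at hfst
          have hmy' : (a, y) ∈ fin.items := by rwa [hfst] at hmy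
          have hsubv := candSubset hnd hrun hmy' hmem
          have hnil : d0[i].2.filter (fun v => !((fin.items.map Prod.snd).contains v)) = [] := by
            rw [List.filter_eq_nil_iff]
            intro v hv
            rcases hsubv v hv with h1 | h1
            · cases h1
            · simp [h1]
          rw [hnil] at hlen
          simp at hlen
        have hrun' : RunAux d0 [] (fin.items ++ [(a, x)]) := by
          apply runSnoc hrun
          exact ⟨d0[i].2, hmem, by simpa using hfilter⟩
        have hitems : (fin.insert a x).items = fin.items ++ [(a, x)] :=
          dictInsertFresh fin a x hfresh
        obtain ⟨tail', heq, hrun'', _⟩ := ih (i+1) (fin.insert a x) (by omega) (by rwa [hitems])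
        rw [hitems] at heq hrun''
        refine ⟨(a, x) :: tail', ?_, by simpa using hrun'', by simp⟩
        rw [part2Pass, dif_pos h]
        simp only [hgd]
        rw [if_pos (by simp)]
        have hV : (fin.items.map Prod.snd) ++ [x] = ((fin.items ++ [(a, x)]).map Prod.snd) := by
          simp
        rw [show ([x].headD "") = x from rfl, discard_maskD, hV, heq]
        simp
      · -- skip branch
        obtain ⟨tail, heq, hrun', hprog⟩ := ih (i+1) fin (by omega) hrun
        refine ⟨tail, ?_, hrun', ?_⟩
        · rw [part2Pass, dif_pos h]
          simp only [hget]
          rw [if_neg (by simpa using hlen)]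
          exact heq
        · rintro ⟨j, hij, hj, hfr, hsing⟩
          apply hprog
          refine ⟨j, ?_, hj, hfr, hsing⟩
          rcases Nat.eq_or_lt_of_le hij with hji | hji
          · exfalso
            subst hji
            exact hlen hsing
          · omega
    · refine ⟨[], ?_, by simpa using hrun, ?_⟩
      · rw [part2Pass, dif_neg h]
        simp
      · rintro ⟨j, hij, hj, -⟩ -
        rw [maskD_length] at h
        omega

theorem whileA_complete {d0 : List (String × List String)} (hnd : (d0.map Prod.fst).Nodup)
    (fin : PySem.Dict String String) (hrun : RunAux d0 [] fin.items)
    (hge : d0.length ≤ fin.items.length) :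
    ∀ a ∈ d0.map Prod.fst, a ∈ fin.items.map Prod.fst := by
  have hknd : (fin.items.map Prod.fst).Nodup := keysNodup hnd hrun
  have hsub : fin.items.map Prod.fst ⊆ d0.map Prod.fst := keysSub hrun
  have hsp : (fin.items.map Prod.fst).Subperm (d0.map Prod.fst) :=
    List.subperm_of_subset hknd hsub
  have hperm : (fin.items.map Prod.fst).Perm (d0.map Prod.fst) :=
    List.Subperm.perm_of_length_le hsp (by simpa using hge)
  intro a ha
  exact hperm.symm.subset ha

theorem whileA_spec {d0 : List (String × List String)} (hnd : (d0.map Prod.fst).Nodup)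
    {L : List (String × String)} (hL : RunAux d0 [] L)
    (hLcov : ∀ a ∈ d0.map Prod.fst, a ∈ L.map Prod.fst) :
    ∀ fuel (fin : PySem.Dict String String), RunAux d0 [] fin.items →
      d0.length ≤ fuel + fin.items.length →
      RunAux d0 [] (part2While fuel (maskD (fin.items.map Prod.snd) d0) fin).2.items ∧
      (∀ a ∈ d0.map Prod.fst,
        a ∈ (part2While fuel (maskD (fin.items.map Prod.snd) d0) fin).2.items.map Prod.fst) := by
  intro fuel
  induction fuel with
  | zero =>
    intro fin hrun hge
    simp only [part2While]
    exact ⟨hrun, whileA_complete hnd fin hrun (by omega)⟩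
  | succ fuel ih =>
    intro fin hrun hge
    by_cases hcond : fin.size < (maskD (fin.items.map Prod.snd) d0).length
    · have hlt : fin.items.length < d0.length := by
        rw [maskD_length] at hcond; exact hcond
      -- some allergen is still unassigned
      have hex : ∃ a ∈ d0.map Prod.fst, a ∉ fin.items.map Prod.fst := by
        by_contra hno
        push Not at hno
        have hsp : (d0.map Prod.fst).Subperm (fin.items.map Prod.fst) :=
          List.subperm_of_subset hnd hno
        have := hsp.length_le
        simp at this
        omega
      obtain ⟨a, s, x, hmem, hfr, hsing⟩ := progress hnd hL hLcov hrun hex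
      obtain ⟨j, hj, hjget⟩ := List.mem_iff_getElem.1 hmem
      obtain ⟨tail, heq, hrun', hne⟩ :=
        passA_spec hnd d0.length 0 fin (by omega) hrun
      have htail : tail ≠ [] := by
        apply hne
        refine ⟨j, Nat.zero_le j, hj, ?_, ?_⟩
        · rw [show d0[j].1 = a from by rw [hjget]]
          exact hfr
        · rw [show d0[j].2 = s from by rw [hjget], hsing]
          rfl
      rw [part2While, if_pos hcond, heq]
      have hfin' : (PySem.Dict.mk (fin.items ++ tail)).items = fin.items ++ tail := rfl
      have := ih (PySem.Dict.mk (fin.items ++ tail)) (by rw [hfin']; exact hrun')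
        (by rw [hfin']; simp; cases tail with
            | nil => exact absurd rfl htail
            | cons t ts => simp; omega)
      rw [hfin'] at this
      exact this
    · rw [part2While, if_neg hcond]
      rw [maskD_length] at hcond
      exact ⟨hrun, whileA_complete hnd fin hrun (by simp [PySem.Dict.size] at hcond; omega)⟩

-- the final dict of A's while loop is a complete forced run
theorem partA_run {d0 : List (String × List String)} (hnd : (d0.map Prod.fst).Nodup)
    {L : List (String × String)} (hL : RunAux d0 [] L)
    (hLcov : ∀ a ∈ d0.map Prod.fst, a ∈ L.map Prod.fst) :
    RunAux d0 [] (part2While d0.length d0 (PySem.Dict.mk [])).2.items ∧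
    (∀ a ∈ d0.map Prod.fst,
      a ∈ (part2While d0.length d0 (PySem.Dict.mk [])).2.items.map Prod.fst) := by
  have h := whileA_spec hnd hL hLcov d0.length (PySem.Dict.mk []) trivial (by simp)
  rwa [show maskD (((PySem.Dict.mk ([] : List (String × String))).items).map Prod.snd) d0 = d0
    from by rw [show ((PySem.Dict.mk ([] : List (String × String))).items).map Prod.snd
        = [] from rfl, maskD_nil]] at h

-- ---- port B: pick/solve characterisation ----
theorem pick_none {used : List String} :
    ∀ {pending : List (String × List String)}, part2Pick used pending = none →
      ∀ e ∈ pending, (e.2.filter (fun v => !(used.contains v))).length ≠ 1 := by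
  intro pending
  induction pending with
  | nil => intro _ e he; cases he
  | cons p rest ih =>
    intro h e he
    obtain ⟨a, s⟩ := p
    simp only [part2Pick] at h
    split at h
    · cases h
    · rename_i hcond
      rcases List.mem_cons.1 he with h1 | h1
      · subst h1
        simpa [PySem.Set.diff] using hcond
      · cases hrec : part2Pick used rest with
        | none => exact ih hrec e h1
        | some r => rw [hrec] at h; cases h

theorem pick_some {used : List String} :
    ∀ {pending : List (String × List String)} {a x : String}
      {rest : List (String × List String)},
      part2Pick used pending = some (a, x, rest) →
      ∃ pre s suf, pending = pre ++ (a, s) :: suf ∧ rest = pre ++ suf ∧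
        s.filter (fun v => !(used.contains v)) = [x] := by
  intro pending
  induction pending with
  | nil => intro a x rest h; simp [part2Pick] at h
  | cons p rest0 ih =>
    intro a x rest h
    obtain ⟨b, s⟩ := p
    simp only [part2Pick] at h
    split at h
    · rename_i hcond
      cases h
      refine ⟨[], s, rest0, by simp, by simp, ?_⟩
      have hds : PySem.Set.diff s used = [(PySem.Set.diff s used).headD ""] :=
        len1_eq_headD (by simpa using hcond)
      simpa [PySem.Set.diff] using hds
    · cases hrec : part2Pick used rest0 with
      | none => rw [hrec] at h; cases h
      | some r =>
        rw [hrec] at h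
        obtain ⟨b', x', rest'⟩ := r
        cases h
        obtain ⟨pre, t, suf, hp, hr, hf⟩ := ih hrec
        exact ⟨(b, s) :: pre, t, suf, by simp [hp], by simp [hr], hf⟩

theorem solveB_spec {d0 : List (String × List String)} (hnd : (d0.map Prod.fst).Nodup)
    {L : List (String × String)} (hL : RunAux d0 [] L)
    (hLcov : ∀ a ∈ d0.map Prod.fst, a ∈ L.map Prod.fst) :
    ∀ n (pending : List (String × List String)) (ps : List (String × String)),
      pending.length ≤ n →
      RunAux d0 [] ps →
      (∀ e ∈ pending, e ∈ d0) →
      (pending.map Prod.fst).Nodup →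
      (∀ a ∈ d0.map Prod.fst, a ∉ ps.map Prod.fst → a ∈ pending.map Prod.fst) →
      (∀ e ∈ pending, e.1 ∉ ps.map Prod.fst) →
      RunAux d0 [] (ps ++ part2Solve pending (ps.map Prod.snd)) ∧
      (∀ a ∈ d0.map Prod.fst, a ∈ (ps ++ part2Solve pending (ps.map Prod.snd)).map Prod.fst) := by
  intro n
  induction n with
  | zero =>
    intro pending ps hlen hrun hpd hpn hcov hdis
    have hpe : pending = [] := List.eq_nil_of_length_eq_zero (by omega)
    subst hpe
    rw [part2Solve]
    simp only [part2Pick]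
    constructor
    · simpa using hrun
    · intro a ha
      by_contra han
      have := hcov a ha (by simpa using han)
      simp at this
  | succ n ih =>
    intro pending ps hlen hrun hpd hpn hcov hdis
    rw [part2Solve]
    split
    · -- pick = none: pending must be empty, ps is complete
      rename_i hnone
      refine ⟨by simpa using hrun, ?_⟩
      intro a ha
      simp only [List.append_nil]
      by_contra han
      have hexx : ∃ a ∈ d0.map Prod.fst, a ∉ ps.map Prod.fst := ⟨a, ha, by simpa using han⟩
      obtain ⟨a', s, x, hmem, hfr, hsing⟩ := progress hnd hL hLcov hrun hexx
      have ha'p : a' ∈ pending.map Prod.fst :=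
        hcov a' (List.mem_map.2 ⟨(a', s), hmem, rfl⟩) hfr
      obtain ⟨⟨a'', s'⟩, hmp, hfst⟩ := List.mem_map.1 ha'p
      simp only at hfst
      have hmp' : (a', s') ∈ pending := by rwa [hfst] at hmp
      have hss : s' = s := entryUniq hnd (hpd _ hmp') hmem
      have := pick_none hnone _ hmp'
      rw [hss] at this
      simp only at this
      rw [hsing] at this
      simp at this
    · rename_i r hsome
      obtain ⟨a, x, rest⟩ := r
      obtain ⟨pre, s, suf, hp, hr, hf⟩ := pick_some hsome
      have hxps : x ∉ ps.map Prod.snd := by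
        intro hx
        have hmem2 : x ∈ s.filter (fun v => !((ps.map Prod.snd).contains v)) := by rw [hf]; simp
        have h2 := (List.mem_filter.1 hmem2).2
        simp [hx] at h2
      have hmem : (a, s) ∈ d0 := hpd _ (by rw [hp]; simp)
      have hrun' : RunAux d0 [] (ps ++ [(a, x)]) :=
        runSnoc hrun ⟨s, hmem, by simpa using hf⟩
      have hadd : PySem.Set.add (ps.map Prod.snd) x = (ps ++ [(a, x)]).map Prod.snd := by
        simp [PySem.Set.add, List.contains_eq_mem, hxps]
      have hanp : a ∉ pre.map Prod.fst ∧ a ∉ suf.map Prod.fst := by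
        have := hpn
        rw [hp] at this
        simp only [List.map_append, List.map_cons] at this
        have h1 := List.Nodup.of_append_right this
        constructor
        · intro hmemp
          have := List.disjoint_of_nodup_append this
          exact this hmemp (by simp)
        · simp only [List.nodup_cons] at h1
          exact h1.1
      have hrest : ∀ e ∈ rest, e ∈ pending := by
        intro e he
        rw [hr] at he
        rw [hp]
        rcases List.mem_append.1 he with h1 | h1
        · simp [h1]
        · simp [h1]
      have ihres := ih rest (ps ++ [(a, x)])
        (by
          have h1 : pending.length = pre.length + suf.length + 1 := by
            rw [hp]; simp only [List.length_append, List.length_cons]; omega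
          have h2 : rest.length = pre.length + suf.length := by
            rw [hr]; simp only [List.length_append]
          omega)
        hrun'
        (fun e he => hpd e (hrest e he))
        (by
          have : rest.Sublist pending := by
            rw [hp, hr]
            exact List.Sublist.append_left (List.sublist_cons_self _ _) pre
          exact (this.map Prod.fst).nodup hpn)
        (by
          intro b hb hbn
          have hba : b ≠ a := by
            intro hba
            subst hba
            exact hbn (by simp)
          have hbp : b ∈ pending.map Prod.fst := by
            apply hcov b hb
            intro hbps
            exact hbn (by simp [List.mem_map] at hbps ⊢; tauto)
          rw [hp] at hbp
          rw [hr]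
          simp only [List.map_append, List.map_cons, List.mem_append, List.mem_cons] at hbp ⊢
          rcases hbp with h1 | h1 | h1
          · exact Or.inl h1
          · exact absurd h1 hba
          · exact Or.inr h1)
        (by
          intro e he
          simp only [List.map_append, List.map_cons, List.mem_append, List.mem_cons]
          push Not
          refine ⟨hdis e (hrest e he), ?_, by simp⟩
          intro hea
          rw [hr] at he
          rcases List.mem_append.1 he with h1 | h1
          · exact hanp.1 (hea ▸ List.mem_map.2 ⟨e, h1, rfl⟩)
          · exact hanp.2 (hea ▸ List.mem_map.2 ⟨e, h1, rfl⟩))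
      rw [hadd] at *
      constructor
      · have := ihres.1
        simpa [List.append_assoc] using this
      · intro b hb
        have := ihres.2 b hb
        simpa [List.append_assoc] using this

theorem partB_run {d0 : List (String × List String)} (hnd : (d0.map Prod.fst).Nodup)
    {L : List (String × String)} (hL : RunAux d0 [] L)
    (hLcov : ∀ a ∈ d0.map Prod.fst, a ∈ L.map Prod.fst) :
    RunAux d0 [] (part2Solve d0 []) ∧
    (∀ a ∈ d0.map Prod.fst, a ∈ (part2Solve d0 []).map Prod.fst) := by
  have h := solveB_spec hnd hL hLcov d0.length d0 [] (le_refl _) trivial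
    (fun e he => he) hnd (fun a ha _ => ha) (fun e _ => by simp)
  simpa using h

-- ---- forced order gives a complete run ----
theorem forcedRun {d0 : List (String × List String)} :
    ∀ (l : List (String × List String)) (used : List String),
      (∀ e ∈ l, e ∈ d0) → part2Forced l used = true →
      ∃ L, RunAux d0 used L ∧ L.map Prod.fst = l.map Prod.fst := by
  intro l
  induction l with
  | nil => intro used _ _; exact ⟨[], trivial, rfl⟩
  | cons p rest ih =>
    intro used hsub hf
    obtain ⟨a, s⟩ := p
    simp only [part2Forced, Bool.and_eq_true, beq_iff_eq] at hf
    obtain ⟨h1, h2⟩ := hf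
    have hfx : s.filter (fun v => !(used.contains v))
        = [(s.filter (fun v => !(used.contains v))).headD ""] := len1_eq_headD h1
    rw [hfx] at h2
    obtain ⟨L', hL', hk⟩ := ih (used ++ [(s.filter (fun v => !(used.contains v))).headD ""])
      (fun e he => hsub e (by simp [he])) h2
    exact ⟨(a, (s.filter (fun v => !(used.contains v))).headD "") :: L',
      ⟨⟨s, hsub (a, s) (by simp), hfx⟩, hL'⟩, by simp [hk]⟩

-- ---- tuple sort = key sort when the keys are distinct ----
theorem insertByCongr {α : Type} (b1 b2 : α → α → Bool) (x : α) :
    ∀ l : List α, (∀ y ∈ l, b1 x y = b2 x y) →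
      PySem.List.insertBy b1 x l = PySem.List.insertBy b2 x l := by
  intro l
  induction l with
  | nil => intro _; rfl
  | cons y ys ih =>
    intro h
    simp only [PySem.List.insertBy]
    rw [h y (by simp)]
    split
    · rfl
    · rw [ih (fun z hz => h z (by simp [hz]))]

theorem foldlInsertCongr {α : Type} (b1 b2 : α → α → Bool) :
    ∀ (ps acc : List α), (∀ p ∈ ps, ∀ y ∈ acc, b1 p y = b2 p y) →
      (∀ p ∈ ps, ∀ q ∈ ps, b1 p q = b2 p q) →
      ps.foldl (fun a x => PySem.List.insertBy b1 x a) acc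
        = ps.foldl (fun a x => PySem.List.insertBy b2 x a) acc := by
  intro ps
  induction ps with
  | nil => intro acc _ _; rfl
  | cons z rest ih =>
    intro acc hacc hps
    simp only [List.foldl_cons]
    rw [insertByCongr b1 b2 z acc (hacc z (by simp))]
    apply ih
    · intro p hp y hy
      rcases (PySem.List.mem_insertBy _ _ _ _).1 hy with h | h
      · rw [h]; exact hps p (by simp [hp]) z (by simp)
      · exact hacc p (by simp [hp]) y h
    · intro p hp q hq
      exact hps p (by simp [hp]) q (by simp [hq])

theorem sorted2Fst (ps : List (String × String)) (h : (ps.map Prod.fst).Nodup) :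
    PySem.List.sorted2 ps Prod.fst Prod.snd false = PySem.List.sorted ps Prod.fst false := by
  simp only [PySem.List.sorted2, PySem.List.sorted]
  have hred : ∀ (f : (String × String) → (String × String) → Bool),
      (if false = true then (fun a b => f b a) else f) = f := by intro f; simp
  rw [hred, hred]
  apply foldlInsertCongr
  · intro p _ y hy; cases hy
  · intro p hp q hq
    by_cases hpq : p = q
    · subst hpq; simp
    · have hne : p.1 ≠ q.1 := fun he => hpq (List.inj_on_of_nodup_map h hp hq he)
      rcases lt_trichotomy p.1 q.1 with hlt | heq | hgt
      · simp [hlt]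
      · exact absurd heq hne
      · simp [hgt, lt_asymm hgt]

-- ===== VERDICT (by name: the statement is the Claim_ definition above) =====
theorem part2_spec : Claim_equal_part2 := by
  intro d0 ic _ hpre
  obtain ⟨hnd, l, hlmem, hforced⟩ := hpre
  have hlp : l.Perm d0 := (List.mem_permutations.1 hlmem)
  obtain ⟨L, hL, hkeys⟩ := forcedRun l [] (fun e he => hlp.subset he) hforced
  have hLcov : ∀ a ∈ d0.map Prod.fst, a ∈ L.map Prod.fst := by
    intro a ha
    rw [hkeys]
    exact ((hlp.map Prod.fst).mem_iff).2 ha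
  obtain ⟨hArun, hAcov⟩ := partA_run hnd hL hLcov
  obtain ⟨hBrun, hBcov⟩ := partB_run hnd hL hLcov
  have hABsub := agree hnd hBrun hArun (keysNodup hnd hArun)
    (fun c hc => hBcov c (keysSub hArun c hc)) (fun v hv => absurd hv (by simp))
  have hBAsub := agree hnd hArun hBrun (keysNodup hnd hBrun)
    (fun c hc => hAcov c (keysSub hBrun c hc)) (fun v hv => absurd hv (by simp))
  have hAnd : (part2While d0.length d0 (PySem.Dict.mk [])).2.items.Nodup :=
    List.Nodup.of_map Prod.fst (keysNodup hnd hArun)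
  have hBnd : (part2Solve d0 []).Nodup :=
    List.Nodup.of_map Prod.fst (keysNodup hnd hBrun)
  have hperm : (part2While d0.length d0 (PySem.Dict.mk [])).2.items.Perm (part2Solve d0 []) :=
    (List.perm_ext_iff_of_nodup hAnd hBnd).2
      (fun pr => ⟨fun hm => hABsub pr hm, fun hm => hBAsub pr hm⟩)
  have hsortedEq : PySem.List.sorted (part2While d0.length d0 (PySem.Dict.mk [])).2.items Prod.fst false
      = PySem.List.sorted (part2Solve d0 []) Prod.fst false := by
    apply PySem.List.sorted_eq_of_perm_of_pairwise_lt
    · exact (PySem.List.sorted_perm (part2Solve d0 []) Prod.fst false).trans hperm.symm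
    · have hle := PySem.List.sorted_pairwise (part2Solve d0 []) Prod.fst
      have hndB : ((PySem.List.sorted (part2Solve d0 []) Prod.fst false).map Prod.fst).Nodup := by
        have hp : ((PySem.List.sorted (part2Solve d0 []) Prod.fst false).map Prod.fst).Perm
            ((part2Solve d0 []).map Prod.fst) :=
          (PySem.List.sorted_perm (part2Solve d0 []) Prod.fst false).map _
        exact (hp.nodup_iff).2 (keysNodup hnd hBrun)
      have hne : (PySem.List.sorted (part2Solve d0 []) Prod.fst false).Pairwise
          (fun a b => a.1 ≠ b.1) := List.pairwise_map.1 hndB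
      exact (hle.and hne).imp (fun hab => lt_of_le_of_ne hab.1 hab.2)
  show part2 d0 ic = part2_alt d0 ic
  simp only [part2, part2_alt]
  rw [sorted2Fst _ (keysNodup hnd hArun), sorted2Fst _ (keysNodup hnd hBrun), hsortedEq]
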